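-- pv_equiv track=rewrite | github.com/headacheboy/mamahaha | AnsExtractor.py | cal_dis_with_dict
-- ===== SOURCE A (Python) =====
-- def cal_dis_with_dict(ques_kw_dic,ans_kw_dic):
--     '''
--     计算 问题关键词index 和 答案关键词index 之间的距离
--     :param ques_kw_dic:
--     :param ans_ke_dic:
--     :return: 按照距离从小到大的 tuple组成的list
--     '''
--     result_dic = dict()
--     for ans_kw,ans_kw_index_lst in ans_kw_dic.items():
--         temp = 99999
--         for ans_kw_index in ans_kw_index_lst:
--             ans_kw_dis = 0
--             for ques_kw,ques_kw_index_lst in ques_kw_dic.items():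
--                 temp_dis = 9999
--                 for ques_kw_index in ques_kw_index_lst:
--                     if abs(ques_kw_index - ans_kw_index) < temp_dis:
--                         temp_dis = abs(ques_kw_index - ans_kw_index)
--                 ans_kw_dis += temp_dis
--             if ans_kw_dis < temp:
--                 temp = ans_kw_dis
--         result_dic[ans_kw] = temp
--     # 排序 从小到大
--     result_tup = sorted(result_dic.items(),key = lambda item:item[1])
--     return result_tup
-- ===== SOURCE B (Python) =====
-- def _bisect_left(s, x):
--     # hand-written bisect_left (module imports are off-limits here)
--     lo, hi = 0, len(s)
--     while lo < hi:
--         mid = (lo + hi) // 2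
--         if s[mid] < x:
--             lo = mid + 1
--         else:
--             hi = mid
--     return lo
--
-- def _nearest(s, x):
--     # s sorted ascending: min over s of |v - x|, capped at 9999 (9999 if s empty)
--     best = 9999
--     i = _bisect_left(s, x)
--     if i < len(s):
--         d = s[i] - x
--         if d < best:
--             best = d
--     if i > 0:
--         d = x - s[i - 1]
--         if d < best:
--             best = d
--     return best
--
-- def cal_dis_with_dict(ques_kw_dic, ans_kw_dic):
--     ques_sorted = [sorted(lst) for lst in ques_kw_dic.values()]
--     result = {}
--     for ans_kw, idx_lst in ans_kw_dic.items():
--         best = 99999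
--         for x in idx_lst:
--             total = 0
--             for s in ques_sorted:
--                 total += _nearest(s, x)
--             if total < best:
--                 best = total
--         result[ans_kw] = best
--     return sorted(result.items(), key=lambda item: item[1])
-- ===== Notes on version B (the rewrite author's own statement) =====
-- stated objective: alternative
-- what changed: B pre-sorts each question index list once and finds the nearest question index for every answer index by binary search, replacing A's inner linear scan over every question index.
import Mathlib
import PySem

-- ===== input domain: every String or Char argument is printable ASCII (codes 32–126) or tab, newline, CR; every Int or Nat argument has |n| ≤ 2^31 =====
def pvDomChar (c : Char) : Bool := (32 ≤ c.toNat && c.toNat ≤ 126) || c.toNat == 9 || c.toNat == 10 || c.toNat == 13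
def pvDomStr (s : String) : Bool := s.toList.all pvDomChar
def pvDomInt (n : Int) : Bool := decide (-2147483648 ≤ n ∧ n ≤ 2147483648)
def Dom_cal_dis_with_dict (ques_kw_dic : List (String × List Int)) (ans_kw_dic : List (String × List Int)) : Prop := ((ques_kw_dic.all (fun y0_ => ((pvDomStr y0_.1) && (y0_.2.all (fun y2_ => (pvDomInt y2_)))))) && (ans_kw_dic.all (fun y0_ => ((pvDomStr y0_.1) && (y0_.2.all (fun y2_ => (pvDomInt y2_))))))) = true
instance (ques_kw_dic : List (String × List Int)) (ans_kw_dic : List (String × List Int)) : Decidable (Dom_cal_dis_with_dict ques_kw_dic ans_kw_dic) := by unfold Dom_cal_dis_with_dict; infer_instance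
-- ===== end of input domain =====

-- B pre-sorts each question index list once and finds the nearest question index per answer
-- index by binary search instead of A's inner linear scan (alternative algorithm, same result).

-- ===== PORT A =====
def cal_dis_with_dict (ques_kw_dic : List (String × List Int)) (ans_kw_dic : List (String × List Int)) : List (String × Int) :=
  let result_dic : PySem.Dict String Int :=
    ans_kw_dic.foldl (fun res p =>
      let temp : Int := p.2.foldl (fun temp ans_kw_index =>
        let ans_kw_dis : Int := ques_kw_dic.foldl (fun acc qp =>
          acc + qp.2.foldl (fun temp_dis ques_kw_index =>
            if |ques_kw_index - ans_kw_index| < temp_dis then |ques_kw_index - ans_kw_index| else temp_dis) 9999) 0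
        if ans_kw_dis < temp then ans_kw_dis else temp) 99999
      res.insert p.1 temp) PySem.Dict.empty
  PySem.List.sorted result_dic.items (fun item => item.2) false

-- ===== PORT B =====
-- Source B's hand-written bisect_left loop is exactly PySem.List.bisectLeft (same lo/hi/mid loop).
-- s.getD i 0 ports s[i]; the index is in range on every reachable branch (guarded by the ifs).
def pvNearest (s : List Int) (x : Int) : Int :=
  let best : Int := 9999
  let i : Nat := PySem.List.bisectLeft s x
  let best := if i < s.length then (if s.getD i 0 - x < best then s.getD i 0 - x else best) else best
  let best := if 0 < i then (if x - s.getD (i - 1) 0 < best then x - s.getD (i - 1) 0 else best) else best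
  best

def cal_dis_with_dict_alt (ques_kw_dic : List (String × List Int)) (ans_kw_dic : List (String × List Int)) : List (String × Int) :=
  let ques_sorted : List (List Int) := ques_kw_dic.map (fun p => PySem.List.sorted p.2 (fun v => v) false)
  let result : PySem.Dict String Int :=
    ans_kw_dic.foldl (fun res p =>
      let best : Int := p.2.foldl (fun best x =>
        let total : Int := ques_sorted.foldl (fun t s => t + pvNearest s x) 0
        if total < best then total else best) 99999
      res.insert p.1 best) PySem.Dict.empty
  PySem.List.sorted result.items (fun item => item.2) false

-- ===== PRECONDITION & SPEC =====
def Spec_cal_dis_with_dict (ques_kw_dic : List (String × List Int)) (ans_kw_dic : List (String × List Int)) (out : List (String × Int)) : Prop := out = cal_dis_with_dict_alt ques_kw_dic ans_kw_dic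
instance (ques_kw_dic : List (String × List Int)) (ans_kw_dic : List (String × List Int)) (out : List (String × Int)) : Decidable (Spec_cal_dis_with_dict ques_kw_dic ans_kw_dic out) := by unfold Spec_cal_dis_with_dict; infer_instance

-- ===== CLAIM (what is proved, stated in full; the proofs are below) =====
def Claim_equal_cal_dis_with_dict : Prop := ∀ (ques_kw_dic : List (String × List Int)) (ans_kw_dic : List (String × List Int)), Dom_cal_dis_with_dict ques_kw_dic ans_kw_dic → Spec_cal_dis_with_dict ques_kw_dic ans_kw_dic (cal_dis_with_dict ques_kw_dic ans_kw_dic)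

-- ===== LEMMAS AND PROOFS =====

-- the fold computing A's per-question-keyword minimal distance is a min-fold
lemma foldA_eq_min_fold (x : Int) (l : List Int) (c : Int) :
    l.foldl (fun temp_dis q => if |q - x| < temp_dis then |q - x| else temp_dis) c
      = l.foldl (fun temp_dis q => min temp_dis |q - x|) c := by
  have h : (fun temp_dis q => if |q - x| < temp_dis then |q - x| else temp_dis)
      = (fun temp_dis q => min temp_dis |q - x|) := by
    funext td q; rcases lt_or_ge |q - x| td with h | h <;> simp [min_def] <;> omega
  rw [h]

lemma min_fold_le_init (x : Int) (l : List Int) (c : Int) :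
    l.foldl (fun td q => min td |q - x|) c ≤ c := by
  induction l generalizing c with
  | nil => simp
  | cons a t ih => exact le_trans (ih (min c |a - x|)) (min_le_left _ _)

lemma min_fold_le_mem (x : Int) (l : List Int) (c : Int) {q : Int} (hq : q ∈ l) :
    l.foldl (fun td q => min td |q - x|) c ≤ |q - x| := by
  induction l generalizing c with
  | nil => cases hq
  | cons a t ih =>
    rcases List.mem_cons.mp hq with h | h
    · subst h; exact le_trans (min_fold_le_init x t _) (min_le_right _ _)
    · exact ih _ h

lemma min_fold_cases (x : Int) (l : List Int) (c : Int) :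
    l.foldl (fun td q => min td |q - x|) c = c ∨
      ∃ q ∈ l, l.foldl (fun td q => min td |q - x|) c = |q - x| := by
  induction l generalizing c with
  | nil => left; rfl
  | cons a t ih =>
    rcases ih (min c |a - x|) with h | ⟨q, hq, h⟩
    · rcases min_choice c |a - x| with hm | hm
      · left; simpa [hm] using h
      · right; exact ⟨a, List.mem_cons_self, by simpa [hm] using h⟩
    · right; exact ⟨q, List.mem_cons_of_mem _ hq, h⟩

lemma getD_mono {s : List Int} (hp : List.Pairwise (· ≤ ·) s) {i j : Nat}
    (hij : i ≤ j) (hj : j < s.length) : s.getD i 0 ≤ s.getD j 0 := by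
  rcases eq_or_lt_of_le hij with rfl | hlt
  · exact le_refl _
  · rw [List.getD_eq_getElem s 0 (lt_of_le_of_lt hij hj), List.getD_eq_getElem s 0 hj]
    exact List.pairwise_iff_getElem.mp hp i j _ hj hlt

-- on a sorted list, the bisect-based nearest distance equals the min-fold of A's inner loop
lemma pvNearest_sorted (s : List Int) (x : Int) (hp : List.Pairwise (· ≤ ·) s) :
    pvNearest s x = s.foldl (fun td q => min td |q - x|) 9999 := by
  obtain ⟨hlen, hlo, hhi⟩ := PySem.List.bisectLeft_spec s x hp
  simp only [pvNearest]
  generalize hgen : PySem.List.bisectLeft s x = i at hlen hlo hhi ⊢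
  have hright : i < s.length → x ≤ s.getD i 0 := by
    intro h; rw [List.getD_eq_getElem s 0 h]; exact hhi i h (le_refl _)
  have hleft : 0 < i → s.getD (i - 1) 0 < x := by
    intro h
    have hl : i - 1 < s.length := by omega
    rw [List.getD_eq_getElem s 0 hl]; exact hlo (i - 1) hl (by omega)
  have key : ∀ E : Int, E ≤ 9999 → (i < s.length → E ≤ s.getD i 0 - x) →
      (0 < i → E ≤ x - s.getD (i - 1) 0) →
      (E = 9999 ∨ (i < s.length ∧ E = s.getD i 0 - x) ∨ (0 < i ∧ E = x - s.getD (i - 1) 0)) →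
      E = s.foldl (fun td q => min td |q - x|) 9999 := by
    intro E hub hri hli hcases
    have hm9999 : s.foldl (fun td q => min td |q - x|) 9999 ≤ 9999 := min_fold_le_init x s 9999
    have hmem : ∀ (j : Nat) (hj : j < s.length),
        s.foldl (fun td q => min td |q - x|) 9999 ≤ |s[j] - x| := by
      intro j hj; exact min_fold_le_mem x s 9999 (List.getElem_mem hj)
    apply le_antisymm
    · -- E ≤ m
      rcases min_fold_cases x s 9999 with h | ⟨q, hq, h⟩
      · rw [h]; exact hub
      · rw [h]
        obtain ⟨j, hj, rfl⟩ := List.mem_iff_getElem.mp hq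
        by_cases hcase : i ≤ j
        · have hilen : i < s.length := lt_of_le_of_lt hcase hj
          have hxj : x ≤ s[j] := hhi j hj hcase
          have hij : s.getD i 0 ≤ s[j] := by
            rw [← List.getD_eq_getElem s 0 hj]; exact getD_mono hp hcase hj
          rw [abs_of_nonneg (by omega)]
          exact le_trans (hri hilen) (by omega)
        · have h0i : 0 < i := by omega
          have hl : i - 1 < s.length := by omega
          have hjx : s[j] < x := hlo j hj (by omega)
          have hji : s[j] ≤ s.getD (i - 1) 0 := by
            rw [← List.getD_eq_getElem s 0 hj]; exact getD_mono hp (by omega) hl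
          have habs : |s[j] - x| = x - s[j] := by rw [abs_of_nonpos (by omega)]; ring
          rw [habs]
          exact le_trans (hli h0i) (by omega)
    · -- m ≤ E
      rcases hcases with rfl | ⟨hilen, rfl⟩ | ⟨h0i, rfl⟩
      · exact hm9999
      · have := hmem i hilen
        have hx : x ≤ s[i] := hhi i hilen (le_refl _)
        rw [abs_of_nonneg (by omega)] at this
        rw [List.getD_eq_getElem s 0 hilen]; omega
      · have hl : i - 1 < s.length := by omega
        have := hmem (i - 1) hl
        have hx : s[i - 1] < x := hlo (i - 1) hl (by omega)
        have habs : |s[i - 1] - x| = x - s[i - 1] := by rw [abs_of_nonpos (by omega)]; ring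
        rw [habs] at this
        rw [List.getD_eq_getElem s 0 hl]; omega
  apply key
  · split_ifs <;> omega
  · intro h; split_ifs <;> omega
  · intro h; split_ifs <;> omega
  · split_ifs
    all_goals first
      | (left; rfl)
      | (right; left; exact ⟨by assumption, rfl⟩)
      | (right; right; exact ⟨by assumption, rfl⟩)

-- key lemma: B's nearest on the sorted copy computes A's inner fold on the original list
lemma pvNearest_key (l : List Int) (x : Int) :
    pvNearest (PySem.List.sorted l (fun v => v) false) x
      = l.foldl (fun temp_dis q => if |q - x| < temp_dis then |q - x| else temp_dis) 9999 := by
  have hp : List.Pairwise (· ≤ ·) (PySem.List.sorted l (fun v => v) false) := by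
    simpa using PySem.List.sorted_pairwise l (fun v => v)
  rw [pvNearest_sorted _ x hp, foldA_eq_min_fold]
  refine List.Perm.foldl_eq (rcomm := ⟨fun b a₁ a₂ => ?_⟩) (PySem.List.sorted_perm l (fun v => v) false) 9999
  simp [min_assoc, min_comm |a₁ - x| |a₂ - x|]

-- ===== VERDICT (by name: the statement is the Claim_ definition above) =====
theorem cal_dis_with_dict_spec : Claim_equal_cal_dis_with_dict := by
  intro q a _
  unfold Spec_cal_dis_with_dict cal_dis_with_dict cal_dis_with_dict_alt
  simp only [List.foldl_map, pvNearest_key]
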